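-- pv_equiv track=rewrite | github.com/gerquinn1978/gvm | grounded-vibe-methodology/skills/gvm-design-system/scripts/test_methodology_hardening_v2_1_0.py | _carry_over_paragraph
-- ===== SOURCE A (Python) =====
-- def _carry_over_paragraph(section: str) -> str:
--     """Extract the carry-over procedure paragraph from a Hard Gate 8 slice.
--
--     The paragraph is opened by the literal anchor `**Carry-over exemption
--     (NFR-1):**` and runs until the next blank line or boldface marker.
--     Returns "" if the anchor is absent — the assertions below treat that
--     as a failure (the procedure paragraph itself has been removed or
--     renamed).
--     """
--     anchor = "**Carry-over exemption (NFR-1):**"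
--     idx = section.find(anchor)
--     if idx == -1:
--         return ""
--     rest = section[idx:]
--     # Terminate at the next double-newline (paragraph break) or the next
--     # boldface heading marker — whichever appears first.
--     candidates = [
--         pos
--         for pos in (rest.find("\n\n"), rest.find("\n**"))
--         if pos != -1
--     ]
--     if not candidates:
--         return rest
--     return rest[: min(candidates)]
-- ===== SOURCE B (Python) =====
-- def _carry_over_paragraph(section: str) -> str:
--     """Extract the carry-over procedure paragraph: single forward scan.
--
--     Instead of two substring searches plus min() plus a slice, walk the
--     tail once and stop at the first newline that is followed by another
--     newline (paragraph break) or by a boldface marker.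
--     """
--     anchor = "**Carry-over exemption (NFR-1):**"
--     idx = section.find(anchor)
--     if idx == -1:
--         return ""
--     rest = section[idx:]
--     out = []
--     for i, ch in enumerate(rest):
--         if ch == "\n" and (rest[i + 1:i + 2] == "\n" or rest[i + 1:i + 3] == "**"):
--             break
--         out.append(ch)
--     return "".join(out)
-- ===== Notes on version B (the rewrite author's own statement) =====
-- stated objective: alternative
-- what changed: Replaces the two substring searches for the blank-line and boldface terminators plus candidate filtering, min() and a slice with one forward character scan over the tail that stops at the first newline followed by another newline or by a boldface marker.
import Mathlib
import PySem

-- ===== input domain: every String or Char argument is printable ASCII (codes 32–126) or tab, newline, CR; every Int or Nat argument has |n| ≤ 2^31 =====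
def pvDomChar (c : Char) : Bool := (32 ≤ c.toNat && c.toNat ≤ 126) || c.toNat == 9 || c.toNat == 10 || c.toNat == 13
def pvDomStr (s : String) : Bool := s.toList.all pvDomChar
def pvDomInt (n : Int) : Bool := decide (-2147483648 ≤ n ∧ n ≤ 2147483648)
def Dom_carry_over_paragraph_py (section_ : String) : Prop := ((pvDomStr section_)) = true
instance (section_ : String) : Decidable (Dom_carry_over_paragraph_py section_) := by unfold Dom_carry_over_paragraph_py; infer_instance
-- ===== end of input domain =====

-- B replaces A's two substring searches + min() + slice with one forward character scan; proved equal on all inputs.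


-- ===== PORT A =====
def carry_over_paragraph_py (section_ : String) : String :=
  let anchor := "**Carry-over exemption (NFR-1):**"
  let idx := PySem.Str.find section_ anchor
  if idx = -1 then ""
  else
    let rest := PySem.Str.slice section_ (some idx) none
    let candidates :=
      ([PySem.Str.find rest "\n\n", PySem.Str.find rest "\n**"].filter (fun pos => pos ≠ -1))
    if candidates.isEmpty then rest
    else PySem.Str.slice rest none (some ((PySem.List.min? candidates (fun x => x)).getD 0))

-- ===== PORT B =====
-- the scan loop of Source B: stop at the first newline followed by another newline or a boldface marker
def pvCut : List Char → List Char
  | [] => []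
  | c :: rest =>
    if c = '\n' ∧ (rest.take 1 = ['\n'] ∨ rest.take 2 = ['*', '*']) then []
    else c :: pvCut rest

def carry_over_paragraph_py_alt (section_ : String) : String :=
  let anchor := "**Carry-over exemption (NFR-1):**"
  let idx := PySem.Str.find section_ anchor
  if idx = -1 then ""
  else
    String.ofList (pvCut (PySem.Str.slice section_ (some idx) none).toList)

-- ===== PRECONDITION & SPEC =====
def Spec_carry_over_paragraph_py (section_ : String) (out : String) : Prop := out = carry_over_paragraph_py_alt section_
instance (section_ : String) (out : String) : Decidable (Spec_carry_over_paragraph_py section_ out) := by unfold Spec_carry_over_paragraph_py; infer_instance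

-- ===== CLAIM (what is proved, stated in full; the proofs are below) =====
def Claim_equal_carry_over_paragraph_py : Prop := ∀ (section_ : String), Dom_carry_over_paragraph_py section_ → Spec_carry_over_paragraph_py section_ (carry_over_paragraph_py section_)

-- ===== LEMMAS AND PROOFS =====

-- the scan condition at the head of the list is exactly "a terminator pattern is a prefix here"
lemma pvCut_cond_iff (c : Char) (rest : List Char) :
    (c = '\n' ∧ (rest.take 1 = ['\n'] ∨ rest.take 2 = ['*', '*'])) ↔
    (['\n', '\n'] <+: c :: rest ∨ ['\n', '*', '*'] <+: c :: rest) := by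
  constructor
  · rintro ⟨rfl, h | h⟩
    · left
      match rest, h with
      | x :: t, h => simp_all [List.take]
    · right
      match rest, h with
      | x :: y :: t, h => simp_all [List.take]
  · rintro (h | h)
    · rcases h with ⟨t, ht⟩
      cases ht
      simp
    · rcases h with ⟨t, ht⟩
      cases ht
      simp

-- if no terminator occurs anywhere, the scan copies the whole list
lemma pvCut_of_no_occ (cs : List Char)
    (h : ∀ i, ¬ ['\n', '\n'] <+: cs.drop i ∧ ¬ ['\n', '*', '*'] <+: cs.drop i) :
    pvCut cs = cs := by
  induction cs with
  | nil => rfl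
  | cons c rest ih =>
    have h0 := h 0
    simp only [List.drop_zero] at h0
    rw [pvCut, if_neg]
    · rw [ih (fun i => by simpa using h (i + 1))]
    · rw [pvCut_cond_iff]; tauto

-- if the first terminator occurrence is at index m, the scan returns the first m characters
lemma pvCut_of_first_occ (cs : List Char) (m : Nat)
    (hat : ['\n', '\n'] <+: cs.drop m ∨ ['\n', '*', '*'] <+: cs.drop m)
    (hbefore : ∀ i < m, ¬ ['\n', '\n'] <+: cs.drop i ∧ ¬ ['\n', '*', '*'] <+: cs.drop i) :
    pvCut cs = cs.take m := by
  induction cs generalizing m with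
  | nil =>
    exfalso
    rcases hat with h | h <;> · rcases h with ⟨t, ht⟩; simp at ht
  | cons c rest ih =>
    cases m with
    | zero =>
      simp only [List.drop_zero] at hat
      rw [pvCut, if_pos ((pvCut_cond_iff c rest).mpr hat), List.take_zero]
    | succ k =>
      have h0 := hbefore 0 (Nat.succ_pos k)
      simp only [List.drop_zero] at h0
      rw [pvCut, if_neg]
      · rw [List.take_succ_cons,
          ih k (by simpa using hat) (fun i hi => by simpa using hbefore (i + 1) (by omega))]
      · rw [pvCut_cond_iff]; tauto

-- "find = -1" means the pattern is a prefix at NO position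
lemma no_prefix_of_find_neg_one (cs sub : List Char) (h : PySem.Chars.find cs sub = -1) :
    ∀ i, ¬ sub <+: cs.drop i := by
  intro i hp
  have hin : PySem.Chars.isIn sub cs = true :=
    (PySem.Chars.exists_prefix_drop_iff_isIn sub cs).mp ⟨i, hp⟩
  exact ((PySem.Chars.find_eq_neg_one_iff cs sub).mp h)
    ((PySem.Chars.isIn_iff_infix sub cs).mp hin)

-- the core fact: A's cut-at-min-of-the-two-finds equals B's single scan, on any char list
lemma cut_eq_scan (cs : List Char) :
    (if (([PySem.Chars.find cs ['\n', '\n'], PySem.Chars.find cs ['\n', '*', '*']].filter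
            (fun pos => pos ≠ -1))).isEmpty
     then cs
     else PySem.List.slice cs none
       (some ((PySem.List.min?
         ([PySem.Chars.find cs ['\n', '\n'], PySem.Chars.find cs ['\n', '*', '*']].filter
            (fun pos => pos ≠ -1)) (fun x => x)).getD 0))) = pvCut cs := by
  by_cases h1 : PySem.Chars.find cs ['\n', '\n'] = -1 <;>
    by_cases h2 : PySem.Chars.find cs ['\n', '*', '*'] = -1
  · -- neither terminator occurs: A returns cs whole, and the scan copies cs
    simp only [h1, h2, List.filter, ne_eq, not_true_eq_false, decide_false, List.isEmpty_nil,
      if_pos]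
    refine (pvCut_of_no_occ cs fun i => ?_).symm
    exact ⟨no_prefix_of_find_neg_one cs _ h1 i, no_prefix_of_find_neg_one cs _ h2 i⟩
  · -- only "\n**" occurs
    have hpos2 : 0 ≤ PySem.Chars.find cs ['\n', '*', '*'] := by
      have := PySem.Chars.neg_one_le_find cs ['\n', '*', '*']; omega
    obtain ⟨hat2, hbef2⟩ := PySem.Chars.find_spec (s := cs) (sub := ['\n', '*', '*']) hpos2
    simp only [h1, h2, List.filter, ne_eq, not_true_eq_false, decide_false, not_false_eq_true,
      decide_true, List.isEmpty_cons, if_false, Bool.false_eq_true,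
      PySem.List.min?_id_cons, List.foldl_nil, Option.getD_some]
    rw [PySem.List.slice_to cs hpos2]
    exact (pvCut_of_first_occ cs _ (Or.inr hat2)
      (fun i hi => ⟨no_prefix_of_find_neg_one cs _ h1 i, hbef2 i hi⟩)).symm
  · -- only "\n\n" occurs
    have hpos1 : 0 ≤ PySem.Chars.find cs ['\n', '\n'] := by
      have := PySem.Chars.neg_one_le_find cs ['\n', '\n']; omega
    obtain ⟨hat1, hbef1⟩ := PySem.Chars.find_spec (s := cs) (sub := ['\n', '\n']) hpos1
    simp only [h1, h2, List.filter, ne_eq, not_true_eq_false, decide_false, not_false_eq_true,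
      decide_true, List.isEmpty_cons, if_false, Bool.false_eq_true,
      PySem.List.min?_id_cons, List.foldl_nil, Option.getD_some]
    rw [PySem.List.slice_to cs hpos1]
    exact (pvCut_of_first_occ cs _ (Or.inl hat1)
      (fun i hi => ⟨hbef1 i hi, no_prefix_of_find_neg_one cs _ h2 i⟩)).symm
  · -- both occur: cut at the smaller of the two first positions
    have hpos1 : 0 ≤ PySem.Chars.find cs ['\n', '\n'] := by
      have := PySem.Chars.neg_one_le_find cs ['\n', '\n']; omega
    have hpos2 : 0 ≤ PySem.Chars.find cs ['\n', '*', '*'] := by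
      have := PySem.Chars.neg_one_le_find cs ['\n', '*', '*']; omega
    obtain ⟨hat1, hbef1⟩ := PySem.Chars.find_spec (s := cs) (sub := ['\n', '\n']) hpos1
    obtain ⟨hat2, hbef2⟩ := PySem.Chars.find_spec (s := cs) (sub := ['\n', '*', '*']) hpos2
    simp only [h1, h2, List.filter, ne_eq, not_false_eq_true, decide_true, List.isEmpty_cons,
      if_false, Bool.false_eq_true, PySem.List.min?_id_cons, List.foldl_cons, List.foldl_nil,
      Option.getD_some]
    have hposm : (0 : Int) ≤ min (PySem.Chars.find cs ['\n', '\n'])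
        (PySem.Chars.find cs ['\n', '*', '*']) := le_min hpos1 hpos2
    rw [PySem.List.slice_to cs hposm]
    rcases le_total (PySem.Chars.find cs ['\n', '\n']) (PySem.Chars.find cs ['\n', '*', '*'])
      with hle | hle
    · rw [min_eq_left hle]
      refine (pvCut_of_first_occ cs _ (Or.inl hat1) (fun i hi => ?_)).symm
      exact ⟨hbef1 i hi, hbef2 i (lt_of_lt_of_le hi (Int.toNat_le_toNat hle))⟩
    · rw [min_eq_right hle]
      refine (pvCut_of_first_occ cs _ (Or.inr hat2) (fun i hi => ?_)).symm
      exact ⟨hbef1 i (lt_of_lt_of_le hi (Int.toNat_le_toNat hle)), hbef2 i hi⟩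

-- ===== VERDICT (by name: the statement is the Claim_ definition above) =====
theorem carry_over_paragraph_py_spec : Claim_equal_carry_over_paragraph_py := by
  intro s _
  simp only [Spec_carry_over_paragraph_py, carry_over_paragraph_py, carry_over_paragraph_py_alt]
  by_cases hidx : PySem.Str.find s "**Carry-over exemption (NFR-1):**" = -1
  · rw [hidx]
    simp
  · simp only [hidx, if_false]
    rw [← String.toList_inj]
    rw [apply_ite String.toList]
    have t1 : ("\n\n" : String).toList = ['\n', '\n'] := by decide
    have t2 : ("\n**" : String).toList = ['\n', '*', '*'] := by decide
    simp only [PySem.Str.find_eq, PySem.Str.toList_slice, PySem.Chars.slice_eq_listSlice,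
      String.toList_ofList, t1, t2]
    exact cut_eq_scan _
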